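-- pv_equiv track=rewrite | github.com/BangDori/python-algorithm | 프로그래머스/1/42840. 모의고사/모의고사.py | solution
-- ===== SOURCE A (Python) =====
-- def solution(answers):
--     person1 = [1, 2, 3, 4, 5]
--     person2 = [2, 1, 2, 3, 2, 4, 2, 5]
--     person3 = [3, 3, 1, 1, 2, 2, 4, 4, 5, 5]
--
--     answer = []
--
--     people = { 1: 0, 2: 0, 3: 0 }
--     for i, number in enumerate(answers):
--         if person1[i % len(person1)] == number: people[1] += 1
--         if person2[i % len(person2)] == number: people[2] += 1
--         if person3[i % len(person3)] == number: people[3] += 1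
--
--     success_count = max(people.values())
--
--     for pid in people.keys():
--         if people[pid] == success_count:
--             answer.append(pid)
--
--     return answer
-- ===== SOURCE B (Python) =====
-- def solution(answers):
--     patterns = [[1, 2, 3, 4, 5],
--                 [2, 1, 2, 3, 2, 4, 2, 5],
--                 [3, 3, 1, 1, 2, 2, 4, 4, 5, 5]]
--     # Histogram of (position mod 40, answer); 40 = lcm of the pattern lengths,
--     # so each pattern's prediction is a function of i % 40.
--     keys = [(i % 40, a) for i, a in enumerate(answers)]
--     cnt = {}
--     for k in keys:
--         cnt[k] = cnt.get(k, 0) + 1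
--     scores = [sum(cnt.get((r, p[r % len(p)]), 0) for r in range(40))
--               for p in patterns]
--     best = max(scores)
--     return [i + 1 for i, s in enumerate(scores) if s == best]
-- ===== Notes on version B (the rewrite author's own statement) =====
-- stated objective: alternative
-- what changed: B builds a histogram of (index mod 40, answer) pairs in one pass (40 = lcm of the pattern lengths) and then computes each pattern's score as a fixed 40-term sum of histogram lookups, instead of A's interleaved pass that tests all three patterns at every answer and updates an id-keyed dict of counters.
import Mathlib
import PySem

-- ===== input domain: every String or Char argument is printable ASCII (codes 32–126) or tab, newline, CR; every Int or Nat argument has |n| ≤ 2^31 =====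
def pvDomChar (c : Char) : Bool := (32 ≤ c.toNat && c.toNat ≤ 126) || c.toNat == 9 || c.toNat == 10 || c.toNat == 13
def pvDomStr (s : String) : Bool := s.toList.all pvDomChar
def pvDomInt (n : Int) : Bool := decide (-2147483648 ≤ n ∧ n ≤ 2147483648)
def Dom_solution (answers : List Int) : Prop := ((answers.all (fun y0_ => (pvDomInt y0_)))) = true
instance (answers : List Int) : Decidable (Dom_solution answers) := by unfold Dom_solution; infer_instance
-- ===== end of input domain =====

-- B replaces A's interleaved pass (test all three patterns at every answer, id-keyed dict of
-- counters) by a one-pass histogram of (index mod 40, answer) pairs — 40 = lcm(5,8,10) — from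
-- which each pattern's score is a fixed 40-term sum of lookups (objective: alternative).

-- ===== PORT A =====
-- the body of A's counting loop (the three 'if patternN hit: people[N] += 1' updates)
def stepA (d : PySem.Dict Int Int) (q : Int × Int) : PySem.Dict Int Int :=
  let person1 : List Int := [1, 2, 3, 4, 5]
  let person2 : List Int := [2, 1, 2, 3, 2, 4, 2, 5]
  let person3 : List Int := [3, 3, 1, 1, 2, 2, 4, 4, 5, 5]
  let d := if PySem.List.pyGetD person1 (PySem.Int.mod q.1 (person1.length : Int)) 0 = q.2
           then d.modify 1 0 (fun x => x + 1) else d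
  let d := if PySem.List.pyGetD person2 (PySem.Int.mod q.1 (person2.length : Int)) 0 = q.2
           then d.modify 2 0 (fun x => x + 1) else d
  if PySem.List.pyGetD person3 (PySem.Int.mod q.1 (person3.length : Int)) 0 = q.2
  then d.modify 3 0 (fun x => x + 1) else d

-- indices i % len(personN) are always in range, so pyGetD's default is never used;
-- people.values() is nonempty by construction, so max never raises and getD 0 is unreachable
def solution (answers : List Int) : List Int :=
  let people0 : PySem.Dict Int Int :=
    ((PySem.Dict.empty.insert 1 0).insert 2 0).insert 3 0
  let people := (PySem.List.enumerate answers 0).foldl stepA people0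
  let successCount := (PySem.List.max? (PySem.Dict.values people) (fun v => v)).getD 0
  (PySem.Dict.keys people).foldl
    (fun ans pid => if people.getD pid 0 = successCount then ans ++ [pid] else ans) []

-- ===== PORT B =====
-- 'cnt.get(k, 0)' lookups, with keys always produced by 'i % 40', never miss their range
def solution_alt (answers : List Int) : List Int :=
  let patterns : List (List Int) :=
    [[1, 2, 3, 4, 5], [2, 1, 2, 3, 2, 4, 2, 5], [3, 3, 1, 1, 2, 2, 4, 4, 5, 5]]
  let keys : List (Int × Int) :=
    (PySem.List.enumerate answers 0).map (fun q => (PySem.Int.mod q.1 40, q.2))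
  let cnt : PySem.Dict (Int × Int) Int :=
    keys.foldl (fun d k => d.insert k (d.getD k 0 + 1)) PySem.Dict.empty
  let scores : List Int := patterns.map (fun p =>
    ((PySem.List.pyRange 0 40 1).map (fun r =>
        cnt.getD (r, PySem.List.pyGetD p (PySem.Int.mod r (p.length : Int)) 0) 0)).sum)
  let best := (PySem.List.max? scores (fun v => v)).getD 0
  (PySem.List.enumerate scores 0).foldl
    (fun ans q => if q.2 = best then ans ++ [q.1 + 1] else ans) []

-- ===== PRECONDITION & SPEC =====
def Spec_solution (answers : List Int) (out : List Int) : Prop := out = solution_alt answers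
instance (answers : List Int) (out : List Int) : Decidable (Spec_solution answers out) := by unfold Spec_solution; infer_instance

-- ===== CLAIM (what is proved, stated in full; the proofs are below) =====
def Claim_equal_solution : Prop := ∀ (answers : List Int), Dom_solution answers → Spec_solution answers (solution answers)

-- ===== LEMMAS AND PROOFS =====

lemma modify1 (a b c : Int) :
    (PySem.Dict.mk [((1 : Int), a), (2, b), (3, c)]).modify 1 0 (fun x => x + 1) =
    PySem.Dict.mk [((1 : Int), a + 1), (2, b), (3, c)] := rfl
lemma modify2 (a b c : Int) :
    (PySem.Dict.mk [((1 : Int), a), (2, b), (3, c)]).modify 2 0 (fun x => x + 1) =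
    PySem.Dict.mk [((1 : Int), a), (2, b + 1), (3, c)] := rfl
lemma modify3 (a b c : Int) :
    (PySem.Dict.mk [((1 : Int), a), (2, b), (3, c)]).modify 3 0 (fun x => x + 1) =
    PySem.Dict.mk [((1 : Int), a), (2, b), (3, c + 1)] := rfl

-- one step of A's loop on the literal three-key dict
lemma stepA_mk (a b c : Int) (q : Int × Int) :
    stepA (PySem.Dict.mk [((1 : Int), a), (2, b), (3, c)]) q =
    PySem.Dict.mk
      [((1 : Int), a + if PySem.List.pyGetD [1, 2, 3, 4, 5] (PySem.Int.mod q.1 (List.length ([1, 2, 3, 4, 5] : List Int) : Int)) 0 = q.2 then 1 else 0),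
       (2, b + if PySem.List.pyGetD [2, 1, 2, 3, 2, 4, 2, 5] (PySem.Int.mod q.1 (List.length ([2, 1, 2, 3, 2, 4, 2, 5] : List Int) : Int)) 0 = q.2 then 1 else 0),
       (3, c + if PySem.List.pyGetD [3, 3, 1, 1, 2, 2, 4, 4, 5, 5] (PySem.Int.mod q.1 (List.length ([3, 3, 1, 1, 2, 2, 4, 4, 5, 5] : List Int) : Int)) 0 = q.2 then 1 else 0)] := by
  simp only [stepA]
  split_ifs <;> (repeat first | rw [modify1] | rw [modify2] | rw [modify3]) <;> try simp

-- A's counting loop, characterised by the three per-pattern counts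
lemma dictLoop (l : List (Int × Int)) (a b c : Int) :
    l.foldl stepA (PySem.Dict.mk [((1 : Int), a), (2, b), (3, c)]) =
    PySem.Dict.mk
      [((1 : Int), a + l.countP (fun q => decide (PySem.List.pyGetD [1, 2, 3, 4, 5] (PySem.Int.mod q.1 (List.length ([1, 2, 3, 4, 5] : List Int) : Int)) 0 = q.2))),
       (2, b + l.countP (fun q => decide (PySem.List.pyGetD [2, 1, 2, 3, 2, 4, 2, 5] (PySem.Int.mod q.1 (List.length ([2, 1, 2, 3, 2, 4, 2, 5] : List Int) : Int)) 0 = q.2))),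
       (3, c + l.countP (fun q => decide (PySem.List.pyGetD [3, 3, 1, 1, 2, 2, 4, 4, 5, 5] (PySem.Int.mod q.1 (List.length ([3, 3, 1, 1, 2, 2, 4, 4, 5, 5] : List Int) : Int)) 0 = q.2)))] := by
  induction l generalizing a b c with
  | nil => simp
  | cons q l ih =>
    simp only [List.foldl_cons, stepA_mk, ih, List.countP_cons, PySem.Dict.mk.injEq,
      List.cons.injEq, Prod.mk.injEq, and_true, true_and, decide_eq_true_eq]
    refine ⟨?_, ?_, ?_⟩ <;> split_ifs <;> push_cast <;> omega

lemma init_eq :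
    (((PySem.Dict.empty : PySem.Dict Int Int).insert 1 0).insert 2 0).insert 3 0 =
    PySem.Dict.mk [((1 : Int), (0 : Int)), (2, 0), (3, 0)] := rfl

-- summing the 0/1 indicators '(r, f r) = k' over a duplicate-free range containing k.1
lemma sum_ind_zero (R : List Int) (f : Int → Int) (k : Int × Int) (hk : k.1 ∉ R) :
    (R.map (fun r => if (r, f r) = k then (1 : Int) else 0)).sum = 0 := by
  induction R with
  | nil => simp
  | cons r R ih =>
    simp only [List.mem_cons, not_or] at hk
    simp only [List.map_cons, List.sum_cons, ih hk.2]
    have : ¬ (r, f r) = k := by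
      intro h; exact hk.1 (by rw [← h])
    simp [this]

lemma sum_ind (R : List Int) (f : Int → Int) (k : Int × Int)
    (hn : R.Nodup) (hk : k.1 ∈ R) :
    (R.map (fun r => if (r, f r) = k then (1 : Int) else 0)).sum =
      if k.2 = f k.1 then 1 else 0 := by
  induction R with
  | nil => cases hk
  | cons r R ih =>
    simp only [List.nodup_cons] at hn
    rcases List.mem_cons.1 hk with h | h
    · subst h
      simp only [List.map_cons, List.sum_cons, sum_ind_zero R f k hn.1]
      have : ((k.1, f k.1) = k) ↔ (k.2 = f k.1) := by
        constructor
        · intro h; exact (congrArg Prod.snd h).symm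
        · intro h; exact Prod.ext rfl h.symm
      split_ifs with h1 h2 h2 <;> simp_all
    · have hr : ¬ (r, f r) = k := by
        intro he; rw [← he] at h; exact hn.1 h
      simp [hr, ih hn.2 h]

-- a sum of per-cell counts over a range covering all keys is a single countP
lemma sum_map_count (R : List Int) (ks : List (Int × Int)) (f : Int → Int)
    (hn : R.Nodup) (h : ∀ k ∈ ks, k.1 ∈ R) :
    (R.map (fun r => (ks.count (r, f r) : Int))).sum =
      (ks.countP (fun k => decide (k.2 = f k.1)) : Int) := by
  induction ks with
  | nil => simp
  | cons k t ih =>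
    have ht : ∀ x ∈ t, x.1 ∈ R := fun x hx => h x (List.mem_cons_of_mem _ hx)
    have hsplit : (R.map (fun r => ((k :: t).count (r, f r) : Int))) =
        (R.map (fun r => ((t.count (r, f r) : Int) +
          if (r, f r) = k then (1 : Int) else 0))) := by
      apply List.map_congr_left
      intro r _
      rw [List.count_cons]
      push_cast
      by_cases hc : (r, f r) = k
      · simp [hc]
      · have hc' : ¬ k = (r, f r) := fun h => hc h.symm
        simp [hc, hc']
    rw [hsplit, PySem.List.sum_map_add_int, ih ht,
        sum_ind R f k hn (h k (List.mem_cons_self)), List.countP_cons]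
    by_cases hc : k.2 = f k.1 <;> simp [hc]

-- B's histogram-sum score for a pattern whose length divides 40 is A's direct match count
lemma score_eq (answers : List Int) (p : List Int)
    (hdvd : ((p.length : Int)) ∣ 40) (hpos : 0 < (p.length : Int)) :
    ((PySem.List.pyRange 0 40 1).map (fun r =>
        (((PySem.List.enumerate answers 0).map (fun q => (PySem.Int.mod q.1 40, q.2))).foldl
            (fun d k => d.insert k (d.getD k 0 + 1)) PySem.Dict.empty).getD
          (r, PySem.List.pyGetD p (PySem.Int.mod r (p.length : Int)) 0) 0)).sum =
    ((PySem.List.enumerate answers 0).countP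
        (fun q => decide (PySem.List.pyGetD p (PySem.Int.mod q.1 (p.length : Int)) 0 = q.2)) : Int) := by
  set ks : List (Int × Int) :=
    (PySem.List.enumerate answers 0).map (fun q => (PySem.Int.mod q.1 40, q.2)) with hks
  have h1 : ∀ r : Int,
      (ks.foldl (fun d k => d.insert k (d.getD k 0 + 1)) PySem.Dict.empty).getD
        (r, PySem.List.pyGetD p (PySem.Int.mod r (p.length : Int)) 0) 0 =
      (ks.count (r, PySem.List.pyGetD p (PySem.Int.mod r (p.length : Int)) 0) : Int) := by
    intro r
    rw [PySem.Dict.getD_foldl_insert_add_one]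
    simp [PySem.Dict.getD_empty]
  have h2 : ∀ k ∈ ks, k.1 ∈ PySem.List.pyRange 0 40 1 := by
    intro k hk
    rw [hks] at hk
    rcases List.mem_map.1 hk with ⟨q, _, hq⟩
    rw [PySem.List.mem_pyRange_one, ← hq]
    exact ⟨PySem.Int.mod_nonneg q.1 (by norm_num), PySem.Int.mod_lt q.1 (by norm_num)⟩
  calc ((PySem.List.pyRange 0 40 1).map (fun r =>
          (ks.foldl (fun d k => d.insert k (d.getD k 0 + 1)) PySem.Dict.empty).getD
            (r, PySem.List.pyGetD p (PySem.Int.mod r (p.length : Int)) 0) 0)).sum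
      = ((PySem.List.pyRange 0 40 1).map (fun r =>
          (ks.count (r, PySem.List.pyGetD p (PySem.Int.mod r (p.length : Int)) 0) : Int))).sum := by
        apply congrArg; exact List.map_congr_left (fun r _ => h1 r)
    _ = (ks.countP (fun k => decide (k.2 = PySem.List.pyGetD p (PySem.Int.mod k.1 (p.length : Int)) 0)) : Int) :=
        sum_map_count _ _ _ (by decide) h2
    _ = ((PySem.List.enumerate answers 0).countP
          (fun q => decide (PySem.List.pyGetD p (PySem.Int.mod q.1 (p.length : Int)) 0 = q.2)) : Int) := by
        rw [hks, List.countP_map]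
        apply congrArg
        apply List.countP_congr
        intro q _
        have hmod : PySem.Int.mod (PySem.Int.mod q.1 40) (p.length : Int) =
            PySem.Int.mod q.1 (p.length : Int) := by
          rw [PySem.Int.mod_eq_emod_of_pos (by norm_num : (0:Int) < 40),
              PySem.Int.mod_eq_emod_of_pos hpos, PySem.Int.mod_eq_emod_of_pos hpos,
              Int.emod_emod_of_dvd _ hdvd]
        simp only [Function.comp, hmod, eq_comm]

-- ===== VERDICT (by name: the statement is the Claim_ definition above) =====
theorem solution_spec : Claim_equal_solution := by
  unfold Claim_equal_solution Spec_solution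
  intro answers _
  simp only [solution, solution_alt, init_eq, dictLoop, List.map_cons, List.map_nil]
  simp only [score_eq answers [1, 2, 3, 4, 5] (by decide) (by decide),
      score_eq answers [2, 1, 2, 3, 2, 4, 2, 5] (by decide) (by decide),
      score_eq answers [3, 3, 1, 1, 2, 2, 4, 4, 5, 5] (by decide) (by decide)]
  simp only [PySem.List.enumerate_cons, PySem.List.enumerate_nil,
    List.foldl_cons, List.foldl_nil, PySem.Dict.keys_mk, PySem.Dict.values_mk,
    PySem.Dict.getD_eq_get?_getD, PySem.Dict.get?_mk_cons]
  norm_num
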